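-- pv_equiv track=rewrite | github.com/printlnHi/NPAProgComp2019 | MainQ5.py | make_losing
-- ===== SOURCE A (Python) =====
-- def apply(mp, re, ce, rn, cn):
--     #1-indexed coordinates
--     nm = list(mp)
--     for i in range(re-1,rn):
--         nm[i] = min(nm[i],ce-1)
--     return nm
--
-- def p1(mp,rn,cn):
--     return rn>=3 and mp[0]==2 and mp[1]==2 and mp[2]==1 and sum(mp[3:])==0
--
-- def p2(mp,rn,cn):
--     return rn>=2 and mp[0]==3 and mp[1]==2 and sum(mp[2:])==0
--
-- def p3(mp,rn,cn):
--     return rn>=3 and mp[0:3] == [4,2,2] and sum(mp[3:])==0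
--
-- def p4(mp, rn, cn):
--     return rn>=4 and mp[0:4] == [3,3,1,1] and sum(mp[4:])==0
--
-- def is_losing(mp,rn,cn):
--     if mp[0]==1+sum(mp[1:]) and max(mp[1:])<=1:
--         return True
--     return p1(mp,rn,cn) or p2(mp,rn,cn) or p3(mp,rn,cn) or p4(mp,rn,cn)
--
-- def make_losing(mp,rn,cn):
--     for xr in range(1,rn+1):
--         for xc in range(1,mp[xr-1]+1):
--             x = apply(mp,xr,xc,rn,cn)
--             if is_losing(x,rn,cn):
--                 return (xr,xc)
--     return None
--
--     return None
-- ===== SOURCE B (Python) =====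
-- def make_losing(mp, rn, cn):
--     # Faster exact search: per-row aggregates (suffix sums, counter, maxima)
--     # make the losing-test O(1) per candidate column, instead of A's rebuild
--     # of the whole board and rescans of its slices for every single move.
--     n = len(mp)
--     R = max(0, min(rn, n))                  # end of the clipped region
--     TS = sum(mp[R:])                        # rows beyond rn are never touched
--     tail_ok1 = all(v <= 1 for v in mp[R:])
--     for r in range(min(rn, n)):             # move row, 0-indexed
--         lim = mp[r]
--         clip = mp[r:R]                      # rows that become min(mp[j], c)
--         cnt = {}
--         for v in clip:
--             cnt[v] = cnt.get(v, 0) + 1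
--         S = sum(v for v in clip if v < 0)   # S = sum(min(v, c) for v in clip) at c = 0
--         G = sum(1 for v in clip if v > 0)   # G = #{v in clip : v > c}       at c = 0
--         e = max(1, r)
--         M1 = max(clip[e - r:]) if e < R else None   # max of clipped rows excluding row 0
--         pre_ok1 = all(v <= 1 for v in mp[1:r])
--         base1 = sum(mp[1:r])
--         base2 = sum(mp[2:r])
--         base3 = sum(mp[3:r])
--         base4 = sum(mp[4:r])
--         c = 0
--         while c < lim:
--             # board after move (r+1, c+1): x[j] = mp[j] (j < r), min(mp[j], c) (r <= j < rn), mp[j] (j >= rn)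
--             def xg(i):          # x[i] for i < rn
--                 return min(mp[i], c) if i >= r else mp[i]
--             def sumfrom(k, base):   # sum(x[k:]) for k <= rn
--                 if k <= r:
--                     return base + S + TS
--                 return S - sum(min(mp[j], c) for j in range(r, k)) + TS
--             w = (xg(0) == 1 + sumfrom(1, base1)
--                  and pre_ok1 and (M1 is None or M1 <= 1 or c <= 1) and tail_ok1)
--             q1 = rn >= 3 and xg(0) == 2 and xg(1) == 2 and xg(2) == 1 and sumfrom(3, base3) == 0
--             q2 = rn >= 2 and xg(0) == 3 and xg(1) == 2 and sumfrom(2, base2) == 0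
--             q3 = rn >= 3 and xg(0) == 4 and xg(1) == 2 and xg(2) == 2 and sumfrom(3, base3) == 0
--             q4 = rn >= 4 and xg(0) == 3 and xg(1) == 3 and xg(2) == 1 and xg(3) == 1 and sumfrom(4, base4) == 0
--             if w or q1 or q2 or q3 or q4:
--                 return (r + 1, c + 1)
--             S += G
--             G -= cnt.get(c + 1, 0)
--             c += 1
--     return None
-- ===== Notes on version B (the rewrite author's own statement) =====
-- stated objective: faster
-- what changed: B precomputes per-row aggregates (clipped suffix sum and >c count maintained incrementally via a value counter, suffix max, prefix sums/flags), so each candidate move is tested by O(1) arithmetic instead of A's per-move board copy plus full rescans (apply + is_losing slices/sums/max).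
import Mathlib
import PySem

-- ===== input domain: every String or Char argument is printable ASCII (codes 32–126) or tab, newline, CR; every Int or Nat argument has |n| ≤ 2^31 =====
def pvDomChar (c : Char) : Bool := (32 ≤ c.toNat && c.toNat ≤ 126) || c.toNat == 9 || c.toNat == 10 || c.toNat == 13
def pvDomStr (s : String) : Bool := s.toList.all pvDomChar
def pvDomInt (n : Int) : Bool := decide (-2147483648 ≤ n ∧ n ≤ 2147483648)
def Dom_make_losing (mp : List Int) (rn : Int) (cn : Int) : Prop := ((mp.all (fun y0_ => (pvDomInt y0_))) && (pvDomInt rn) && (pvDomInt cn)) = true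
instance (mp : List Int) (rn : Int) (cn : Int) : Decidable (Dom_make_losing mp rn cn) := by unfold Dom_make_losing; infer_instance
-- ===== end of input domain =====

-- B replaces A's per-move board rebuild and rescans by per-row aggregates kept up to date
-- in O(1) per candidate column (objective: faster).

-- ===== PORT A =====

-- apply(mp, re, ce, rn, cn)
def pvApply (mp : List Int) (re : Int) (ce : Int) (rn : Int) (cn : Int) : List Int :=
  (PySem.List.pyRange (re - 1) rn 1).foldl
    (fun nm i =>
      match PySem.List.pyGet? nm i with
      | some v => nm.set i.toNat (min v (ce - 1))
      | none => nm)   -- IndexError: unreachable inside Pre_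
    mp

def pvP1 (mp : List Int) (rn : Int) (cn : Int) : Bool :=
  decide (3 ≤ rn) && (PySem.List.pyGetD mp 0 0 == 2) && (PySem.List.pyGetD mp 1 0 == 2)
    && (PySem.List.pyGetD mp 2 0 == 1) && ((PySem.List.slice mp (some 3) none).sum == 0)

def pvP2 (mp : List Int) (rn : Int) (cn : Int) : Bool :=
  decide (2 ≤ rn) && (PySem.List.pyGetD mp 0 0 == 3) && (PySem.List.pyGetD mp 1 0 == 2)
    && ((PySem.List.slice mp (some 2) none).sum == 0)

def pvP3 (mp : List Int) (rn : Int) (cn : Int) : Bool :=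
  decide (3 ≤ rn) && (PySem.List.slice mp (some 0) (some 3) == ([4, 2, 2] : List Int))
    && ((PySem.List.slice mp (some 3) none).sum == 0)

def pvP4 (mp : List Int) (rn : Int) (cn : Int) : Bool :=
  decide (4 ≤ rn) && (PySem.List.slice mp (some 0) (some 4) == ([3, 3, 1, 1] : List Int))
    && ((PySem.List.slice mp (some 4) none).sum == 0)

def pvIsLosing (mp : List Int) (rn : Int) (cn : Int) : Bool :=
  -- 'if c: return True; return p1 or p2 or p3 or p4'  =  c || (p1 or p2 or p3 or p4)
  ((PySem.List.pyGetD mp 0 0 == 1 + (PySem.List.slice mp (some 1) none).sum)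
      && (match PySem.List.max? (PySem.List.slice mp (some 1) none) (fun x => x) with
          | some m => decide (m ≤ 1)
          | none => false))   -- ValueError on max([]): unreachable inside Pre_
  || (pvP1 mp rn cn || pvP2 mp rn cn || pvP3 mp rn cn || pvP4 mp rn cn)

-- inner 'for xc in range(1, mp[xr-1]+1)' with early return
def pvFindC (mp : List Int) (rn : Int) (cn : Int) (xr : Int) : List Int → Option Int
  | [] => none
  | xc :: rest =>
    if pvIsLosing (pvApply mp xr xc rn cn) rn cn then some xc
    else pvFindC mp rn cn xr rest

-- outer 'for xr in range(1, rn+1)' with early return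
def pvFindR (mp : List Int) (rn : Int) (cn : Int) : List Int → Option (Int × Int)
  | [] => none
  | xr :: rest =>
    match pvFindC mp rn cn xr (PySem.List.pyRange 1 (PySem.List.pyGetD mp (xr - 1) 0 + 1) 1) with
    | some xc => some (xr, xc)
    | none => pvFindR mp rn cn rest

def make_losing (mp : List Int) (rn : Int) (cn : Int) : Option (Int × Int) :=
  pvFindR mp rn cn (PySem.List.pyRange 1 (rn + 1) 1)

-- ===== PORT B =====

-- xg(i) in Source B
def pvXg (mp : List Int) (r : Int) (c : Int) (i : Int) : Int :=
  if r ≤ i then min (PySem.List.pyGetD mp i 0) c else PySem.List.pyGetD mp i 0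

-- sumfrom(k, base) in Source B
def pvSumFrom (mp : List Int) (r : Int) (c : Int) (S : Int) (TS : Int) (base : Int) (k : Int) : Int :=
  if k ≤ r then base + S + TS
  else S - ((PySem.List.pyRange r k 1).map (fun j => min (PySem.List.pyGetD mp j 0) c)).sum + TS

-- the O(1) losing test of Source B's inner loop body
def pvCheck (mp : List Int) (rn : Int) (r : Int) (TS : Int) (tailOk1 : Bool) (M1 : Option Int)
    (preOk1 : Bool) (base1 base2 base3 base4 : Int) (c : Int) (S : Int) : Bool :=
  let w := (pvXg mp r c 0 == 1 + pvSumFrom mp r c S TS base1 1) && preOk1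
      && (match M1 with
          | none => true
          | some m => decide (m ≤ 1) || decide (c ≤ 1))
      && tailOk1
  let q1 := decide (3 ≤ rn) && (pvXg mp r c 0 == 2) && (pvXg mp r c 1 == 2)
      && (pvXg mp r c 2 == 1) && (pvSumFrom mp r c S TS base3 3 == 0)
  let q2 := decide (2 ≤ rn) && (pvXg mp r c 0 == 3) && (pvXg mp r c 1 == 2)
      && (pvSumFrom mp r c S TS base2 2 == 0)
  let q3 := decide (3 ≤ rn) && (pvXg mp r c 0 == 4) && (pvXg mp r c 1 == 2)
      && (pvXg mp r c 2 == 2) && (pvSumFrom mp r c S TS base3 3 == 0)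
  let q4 := decide (4 ≤ rn) && (pvXg mp r c 0 == 3) && (pvXg mp r c 1 == 3)
      && (pvXg mp r c 2 == 1) && (pvXg mp r c 3 == 1) && (pvSumFrom mp r c S TS base4 4 == 0)
  w || q1 || q2 || q3 || q4

-- 'while c < lim' with S, G maintained incrementally; fuel = number of iterations left
def pvInner (mp : List Int) (rn : Int) (r : Int) (TS : Int) (tailOk1 : Bool) (M1 : Option Int)
    (preOk1 : Bool) (base1 base2 base3 base4 : Int) (cnt : PySem.Dict Int Int) :
    Int → Int → Int → Nat → Option Int
  | _, _, _, 0 => none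
  | c, S, G, Nat.succ fuel =>
    if pvCheck mp rn r TS tailOk1 M1 preOk1 base1 base2 base3 base4 c S then some c
    else pvInner mp rn r TS tailOk1 M1 preOk1 base1 base2 base3 base4 cnt
      (c + 1) (S + G) (G - cnt.getD (c + 1) 0) fuel

-- one iteration of 'for r in range(min(rn, n))': the per-row precomputation + inner loop
def pvRow (mp : List Int) (rn : Int) (R : Int) (TS : Int) (tailOk1 : Bool) (r : Int) : Option Int :=
  let lim := PySem.List.pyGetD mp r 0
  let clip := PySem.List.slice mp (some r) (some R)
  let cnt := PySem.Dict.counter clip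
  let S := (clip.filter (fun v => decide (v < 0))).sum
  let G := ((clip.countP (fun v => decide (0 < v)) : Nat) : Int)
  let e := max 1 r
  let M1 := if e < R then PySem.List.max? (PySem.List.slice clip (some (e - r)) none) (fun x => x)
            else none
  let preOk1 := (PySem.List.slice mp (some 1) (some r)).all (fun v => decide (v ≤ 1))
  let base1 := (PySem.List.slice mp (some 1) (some r)).sum
  let base2 := (PySem.List.slice mp (some 2) (some r)).sum
  let base3 := (PySem.List.slice mp (some 3) (some r)).sum
  let base4 := (PySem.List.slice mp (some 4) (some r)).sum
  pvInner mp rn r TS tailOk1 M1 preOk1 base1 base2 base3 base4 cnt 0 S G lim.toNat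

def pvOuter (mp : List Int) (rn : Int) (R : Int) (TS : Int) (tailOk1 : Bool) :
    List Int → Option (Int × Int)
  | [] => none
  | r :: rest =>
    match pvRow mp rn R TS tailOk1 r with
    | some c => some (r + 1, c + 1)
    | none => pvOuter mp rn R TS tailOk1 rest

def make_losing_alt (mp : List Int) (rn : Int) (cn : Int) : Option (Int × Int) :=
  let n : Int := mp.length
  let R := max 0 (min rn n)
  let TS := (PySem.List.slice mp (some R) none).sum
  let tailOk1 := (PySem.List.slice mp (some R) none).all (fun v => decide (v ≤ 1))
  pvOuter mp rn R TS tailOk1 (PySem.List.pyRange 0 (min rn n) 1)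

-- ===== PRECONDITION & SPEC =====
-- Pre_ excludes exactly the inputs where A raises: rn > len(mp) (IndexError in apply or on
-- mp[xr-1]) and the one-row board [a] with a ≥ 2 (ValueError from max([]) at move (1,2)).
def Pre_make_losing (mp : List Int) (rn : Int) (cn : Int) : Prop :=
  1 ≤ rn → (rn ≤ mp.length ∧ ¬(mp.length = 1 ∧ 2 ≤ mp.headD 0))
instance (mp : List Int) (rn : Int) (cn : Int) : Decidable (Pre_make_losing mp rn cn) := by
  unfold Pre_make_losing; infer_instance

def pvWitness_make_losing : List Int × Int × Int := ([3, 2, 1], 3, 3)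

def Spec_make_losing (mp : List Int) (rn : Int) (cn : Int) (out : Option (Int × Int)) : Prop :=
  out = make_losing_alt mp rn cn
instance (mp : List Int) (rn : Int) (cn : Int) (out : Option (Int × Int)) :
    Decidable (Spec_make_losing mp rn cn out) := by unfold Spec_make_losing; infer_instance

-- ===== CLAIM (what is proved, stated in full; the proofs are below) =====
def Claim_equal_make_losing : Prop := ∀ (mp : List Int) (rn : Int) (cn : Int),
  Dom_make_losing mp rn cn → Pre_make_losing mp rn cn →
  Spec_make_losing mp rn cn (make_losing mp rn cn)


-- ===== LEMMAS AND PROOFS =====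

theorem make_losing_witness_ok :
    Dom_make_losing pvWitness_make_losing.1 pvWitness_make_losing.2.1 pvWitness_make_losing.2.2
    ∧ Pre_make_losing pvWitness_make_losing.1 pvWitness_make_losing.2.1 pvWitness_make_losing.2.2 := by
  constructor <;> decide

-- proof-side views of the board after move (r+1, c+1) on an rn-row board
def pvClip (mp : List Int) (r R : Nat) : List Int := (mp.drop r).take (R - r)

def pvX (mp : List Int) (r R : Nat) (c : Int) : List Int :=
  mp.take r ++ (pvClip mp r R).map (fun v => min v c) ++ mp.drop R

-- the values B maintains incrementally across the inner loop
def pvSval (mp : List Int) (r R : Nat) (c : Int) : Int :=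
  ((pvClip mp r R).map (fun v => min v c)).sum

def pvGval (mp : List Int) (r R : Nat) (c : Int) : Int :=
  ((pvClip mp r R).countP (fun v => decide (c < v)) : Nat)

-- A's in-place update loop is take/map/drop
theorem pvApplyFold (f : Int → Int) (k : Nat) : ∀ (a b : Nat) (xs : List Int),
    b - a = k → a ≤ b → b ≤ xs.length →
    (PySem.List.pyRange (a:Int) (b:Int) 1).foldl (fun nm i =>
      match PySem.List.pyGet? nm i with
      | some v => nm.set i.toNat (f v)
      | none => nm) xs
    = xs.take a ++ ((xs.drop a).take (b - a)).map f ++ xs.drop b := by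
  induction k with
  | zero =>
    intro a b xs hk hab hb
    have hab' : a = b := by omega
    subst hab'
    rw [PySem.List.pyRange_one_eq_nil (by omega)]
    simp [List.take_append_drop]
  | succ k ih =>
    intro a b xs hk hab hb
    have hlt : a < b := by omega
    rw [PySem.List.pyRange_one_cons (by exact_mod_cast hlt)]
    simp only [List.foldl_cons]
    have ha : a < xs.length := by omega
    rw [PySem.List.pyGet?_ofNat xs a ha]
    simp only [Int.toNat_natCast]
    rw [List.set_eq_take_cons_drop (f xs[a]) ha]
    have hcast : ((a:Int) + 1) = ((a+1 : Nat) : Int) := by push_cast; ring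
    rw [hcast]
    have hlen : (xs.take a ++ f xs[a] :: xs.drop (a + 1)).length = xs.length := by
      simp; omega
    have ht1 : (xs.take a ++ f xs[a] :: xs.drop (a + 1)).take (a+1) = xs.take a ++ [f xs[a]] := by
      rw [List.take_append]
      simp [List.length_take, Nat.min_eq_left (le_of_lt ha)]
    have ht2 : (xs.take a ++ f xs[a] :: xs.drop (a + 1)).drop (a+1) = xs.drop (a+1) := by
      rw [List.drop_append]
      simp [List.length_take, Nat.min_eq_left (le_of_lt ha)]
    have ht3 : (xs.take a ++ f xs[a] :: xs.drop (a + 1)).drop b = xs.drop b := by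
      rw [List.drop_append]
      have h1 : (xs.take a).drop b = [] := List.drop_eq_nil_of_le (by simp; omega)
      rw [h1, show b - (xs.take a).length = (b - (a+1)) + 1 by simp [List.length_take]; omega]
      simp only [List.drop_succ_cons, List.drop_drop, List.nil_append]
      congr 1
      omega
    rw [ih (a+1) b _ (by omega) (by omega) (hlen ▸ hb)]
    rw [ht1, ht2, ht3]
    rw [List.drop_eq_getElem_cons ha]
    rw [show b - a = (b - (a+1)) + 1 by omega]
    simp [List.map_cons]
    rw [show (List.drop a (List.map f xs)) = (List.map f xs)[a]'(by simpa using ha) :: List.drop (a+1) (List.map f xs) from List.drop_eq_getElem_cons (by simpa using ha)]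
    simp


theorem pvApply_eq (mp : List Int) (r R : Nat) (c cn : Int) (hr : r ≤ R) (hn : R ≤ mp.length) :
    pvApply mp ((r:Int)+1) (c+1) (R:Int) cn = pvX mp r R c := by
  unfold pvApply pvX pvClip
  rw [show ((r:Int) + 1 - 1) = (r:Int) by ring, show (c + 1 - 1 : Int) = c by ring]
  exact pvApplyFold (fun v => min v c) (R - r) r R mp rfl hr hn


theorem pvX_length (mp : List Int) (r R : Nat) (c : Int) (hr : r ≤ R) (hn : R ≤ mp.length) :
    (pvX mp r R c).length = mp.length := by
  simp [pvX, pvClip]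
  omega


-- element access on the updated board
theorem pvX_getD (mp : List Int) (r R : Nat) (c : Int) (i : Nat)
    (hr : r ≤ R) (hn : R ≤ mp.length) (hi : i < R) :
    PySem.List.pyGetD (pvX mp r R c) (i:Int) 0 = pvXg mp (r:Int) c (i:Int) := by
  have hi' : i < mp.length := lt_of_lt_of_le hi hn
  have hX : i < (pvX mp r R c).length := by rw [pvX_length mp r R c hr hn]; exact hi'
  unfold pvXg
  rw [PySem.List.pyGetD_natCast, PySem.List.pyGetD_natCast,
      List.getD_eq_getElem _ 0 hX, List.getD_eq_getElem _ 0 hi']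
  unfold pvX
  rw [List.getElem_append_left (by simp [pvClip]; omega)]
  by_cases hir : i < r
  · rw [if_neg (by exact_mod_cast (by omega : ¬ (r ≤ i)))]
    rw [List.getElem_append_left (by simp; omega)]
    simp [List.getElem_take]
  · rw [if_pos (by exact_mod_cast (by omega : r ≤ i))]
    rw [List.getElem_append_right (by simp; omega)]
    simp only [List.getElem_map, pvClip, List.getElem_take, List.getElem_drop,
      List.length_take, List.length_drop]
    congr 2 <;> omega

theorem pvMapRange (g : Int → Int) (k : Nat) : ∀ (a b : Nat) (mp : List Int), b - a = k → b ≤ mp.length →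
    (PySem.List.pyRange (a:Int) (b:Int) 1).map (fun j => g (PySem.List.pyGetD mp j 0))
      = ((mp.drop a).take (b - a)).map g := by
  induction k with
  | zero =>
    intro a b mp hk hb
    rw [PySem.List.pyRange_one_eq_nil (by omega), hk]
    simp
  | succ k ih =>
    intro a b mp hk hb
    have hlt : a < b := by omega
    have ha : a < mp.length := by omega
    rw [PySem.List.pyRange_one_cons (by exact_mod_cast hlt)]
    simp only [List.map_cons]
    rw [show ((a:Int) + 1) = ((a+1 : Nat) : Int) by push_cast; ring]
    rw [ih (a+1) b mp (by omega) hb]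
    rw [PySem.List.pyGetD_natCast, List.getD_eq_getElem mp 0 ha]
    rw [show List.drop a mp = mp[a] :: List.drop (a+1) mp from List.drop_eq_getElem_cons ha,
        show b - a = (b - (a+1)) + 1 by omega]
    simp only [List.take_succ_cons, List.map_cons]


-- suffix sums of the updated board = B's sumfrom
theorem pvX_sumFrom (mp : List Int) (r R : Nat) (c : Int) (k : Nat)
    (hr : r < R) (hn : R ≤ mp.length) (hk : k ≤ R) :
    ((pvX mp r R c).drop k).sum
      = pvSumFrom mp (r:Int) c (pvSval mp r R c) ((mp.drop R).sum)
          (((mp.drop k).take (r - k)).sum) (k:Int) := by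
  have hA : (mp.take r).length = r := by simp; omega
  have hclip : (pvClip mp r R).length = R - r := by simp [pvClip]; omega
  unfold pvSumFrom pvX pvSval
  by_cases hkr : k ≤ r
  · rw [if_pos (by exact_mod_cast hkr)]
    rw [List.drop_append, List.drop_append]
    have h0 : k - (mp.take r).length = 0 := by omega
    have h1 : k - (mp.take r ++ (pvClip mp r R).map (fun v => min v c)).length = 0 := by
      simp [hA, hclip]; omega
    rw [h0, h1, List.drop_zero, List.drop_zero]
    rw [List.sum_append, List.sum_append]
    rw [List.drop_take]
  · rw [if_neg (by exact_mod_cast hkr)]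
    rw [pvMapRange (fun v => min v c) (k - r) r k mp rfl (by omega)]
    rw [List.drop_append, List.drop_append]
    have h0 : (mp.take r).drop k = [] := List.drop_eq_nil_of_le (by omega)
    have h1 : k - (mp.take r ++ (pvClip mp r R).map (fun v => min v c)).length = 0 := by
      simp [hA, hclip]; omega
    rw [h0, h1, List.drop_zero, List.nil_append]
    rw [hA, ← List.map_drop]
    rw [List.sum_append]
    have hsplit : ((pvClip mp r R).map (fun v => min v c)).sum
        = (((pvClip mp r R).take (k - r)).map (fun v => min v c)).sum
          + (((pvClip mp r R).drop (k - r)).map (fun v => min v c)).sum := by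
      rw [← List.sum_append, ← List.map_append, List.take_append_drop]
    rw [hsplit]
    have htt : (pvClip mp r R).take (k - r) = (mp.drop r).take (k - r) := by
      unfold pvClip
      rw [List.take_take]
      congr 1
      omega
    rw [htt]
    ring

-- Python's max(xs) <= 1 test is an all-test on nonempty xs
theorem pvMaxLe1 (xs : List Int) (h : xs ≠ []) :
    (match PySem.List.max? xs (fun x => x) with
      | some m => decide (m ≤ 1)
      | none => false) = xs.all (fun v => decide (v ≤ 1)) := by
  cases xs with
  | nil => exact absurd rfl h
  | cons a t =>
    rw [PySem.List.max?_id_cons]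
    rw [Bool.eq_iff_iff]
    simp only [decide_eq_true_iff, List.all_eq_true, decide_eq_true_iff]
    constructor
    · intro hm x hx
      rcases List.mem_cons.mp hx with rfl | hx
      · exact le_trans (PySem.List.le_foldl_max t x).1 hm
      · exact le_trans ((PySem.List.le_foldl_max t a).2 x hx) hm
    · intro hall
      rcases PySem.List.foldl_max_mem t a with he | he
      · rw [he]; exact hall a (List.mem_cons_self)
      · exact hall _ (List.mem_cons_of_mem a he)


-- clipped values all ≤ 1  ↔  c ≤ 1 or the raw values all ≤ 1
theorem pvAllMin (l : List Int) (c : Int) :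
    (l.map (fun v => min v c)).all (fun v => decide (v ≤ 1))
      = (decide (c ≤ 1) || l.all (fun v => decide (v ≤ 1))) := by
  by_cases hc : c ≤ 1
  · have h1 : decide (c ≤ 1) = true := by simpa
    rw [h1, Bool.true_or]
    refine List.all_eq_true.mpr ?_
    intro x hx
    obtain ⟨v, hv, rfl⟩ := List.mem_map.mp hx
    simp only [decide_eq_true_iff]
    omega
  · have h1 : decide (c ≤ 1) = false := by simp; omega
    rw [h1, Bool.false_or]
    induction l with
    | nil => rfl
    | cons a t ih =>
      simp only [List.map_cons, List.all_cons, ih]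
      congr 1
      simp only [decide_eq_decide]
      omega

-- S-invariant step: sum of clipped values at c+1
theorem pvSval_succ (l : List Int) (c : Int) :
    (l.map (fun v => min v (c+1))).sum
      = (l.map (fun v => min v c)).sum + ((l.countP (fun v => decide (c < v)) : Nat) : Int) := by
  induction l with
  | nil => simp
  | cons a t ih =>
    simp only [List.map_cons, List.sum_cons, List.countP_cons, ih]
    by_cases h : c < a <;> simp [h] <;> push_cast <;> omega


-- G-invariant step: the count of values > c+1
theorem pvGval_succ (l : List Int) (c : Int) :
    ((l.countP (fun v => decide ((c+1) < v)) : Nat) : Int)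
      = ((l.countP (fun v => decide (c < v)) : Nat) : Int) - ((l.count (c+1) : Nat) : Int) := by
  induction l with
  | nil => simp
  | cons a t ih =>
    simp only [List.countP_cons, List.count_cons]
    by_cases h1 : c + 1 < a <;> by_cases h2 : a = c + 1 <;>
      simp [h1, h2] <;> push_cast <;> omega


-- S at c = 0 is the sum of the negative values
theorem pvSval_zero (l : List Int) :
    (l.map (fun v => min v 0)).sum = (l.filter (fun v => decide (v < 0))).sum := by
  induction l with
  | nil => simp
  | cons a t ih =>
    by_cases h : a < 0 <;> simp [h, ih] <;> omega


-- xs[0:3] == [u,v,w] elementwise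
theorem pvTakeEq3 (xs : List Int) (h : 3 ≤ xs.length) (u v w : Int) :
    (PySem.List.slice xs (some (0:Int)) (some (3:Int)) == ([u, v, w] : List Int))
      = ((PySem.List.pyGetD xs 0 0 == u) && (PySem.List.pyGetD xs 1 0 == v)
          && (PySem.List.pyGetD xs 2 0 == w)) := by
  match xs, h with
  | a :: b :: d :: t, _ =>
    simp [pysem, PySem.List.slice, PySem.List.clampIdx, Bool.and_assoc]

-- xs[0:4] == [u,v,w,z] elementwise
theorem pvTakeEq4 (xs : List Int) (h : 4 ≤ xs.length) (u v w z : Int) :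
    (PySem.List.slice xs (some (0:Int)) (some (4:Int)) == ([u, v, w, z] : List Int))
      = ((PySem.List.pyGetD xs 0 0 == u) && (PySem.List.pyGetD xs 1 0 == v)
          && (PySem.List.pyGetD xs 2 0 == w) && (PySem.List.pyGetD xs 3 0 == z)) := by
  match xs, h with
  | a :: b :: d :: e :: t, _ =>
    simp [pysem, PySem.List.slice, PySem.List.clampIdx, Bool.and_assoc]

-- the tail-maximum test of A in terms of B's per-row aggregates
theorem pvMaxEq (mp : List Int) (r R : Nat) (c : Int) (hr : r < R) (hn : R ≤ mp.length) :
    ((pvX mp r R c).drop 1).all (fun v => decide (v ≤ 1))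
      = ((((mp.drop 1).take (r - 1)).all (fun v => decide (v ≤ 1)))
          && (match (if (max 1 r) < R
                then PySem.List.max? ((pvClip mp r R).drop (max 1 r - r)) (fun x => x)
                else none) with
              | none => true
              | some m => decide (m ≤ 1) || decide (c ≤ 1))
          && ((mp.drop R).all (fun v => decide (v ≤ 1)))) := by
  have hclip : (pvClip mp r R).length = R - r := by simp [pvClip]; omega
  by_cases hr0 : r = 0
  · subst hr0
    have hX : (pvX mp 0 R c).drop 1
        = ((pvClip mp 0 R).drop 1).map (fun v => min v c) ++ mp.drop R := by
      unfold pvX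
      rw [List.take_zero, List.nil_append, List.drop_append]
      rw [show 1 - ((pvClip mp 0 R).map (fun v => min v c)).length = 0 by simp [hclip]; omega]
      rw [List.drop_zero, List.map_drop]
    rw [hX, List.all_append]
    simp only [Nat.zero_sub, Nat.sub_zero, List.take_zero, List.all_nil, Bool.true_and,
      Nat.max_zero]
    by_cases h1R : 1 < R
    · rw [if_pos h1R]
      have hne : (pvClip mp 0 R).drop 1 ≠ [] := by
        intro hcon
        have := congrArg List.length hcon
        simp [hclip] at this
        omega
      cases hmx : PySem.List.max? ((pvClip mp 0 R).drop 1) (fun x => x) with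
      | none => exact absurd ((PySem.List.max?_eq_none_iff _ _).mp hmx) hne
      | some m =>
        have hall := pvMaxLe1 ((pvClip mp 0 R).drop 1) hne
        rw [hmx] at hall
        rw [pvAllMin, ← hall, Bool.or_comm]
    · rw [if_neg h1R]
      have hdrop : (pvClip mp 0 R).drop 1 = [] := List.drop_eq_nil_of_le (by omega)
      simp [hdrop]
  · have hr1 : 1 ≤ r := by omega
    have hX : (pvX mp r R c).drop 1
        = ((mp.drop 1).take (r - 1) ++ (pvClip mp r R).map (fun v => min v c)) ++ mp.drop R := by
      unfold pvX
      rw [List.drop_append, List.drop_append]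
      rw [show 1 - (mp.take r).length = 0 by simp; omega, List.drop_zero]
      rw [show 1 - (mp.take r ++ (pvClip mp r R).map (fun v => min v c)).length = 0 by
        simp [hclip]; omega, List.drop_zero]
      rw [List.drop_take]
    rw [hX, List.all_append, List.all_append]
    have hmr : max 1 r = r := by omega
    rw [hmr, Nat.sub_self, List.drop_zero, if_pos hr]
    have hne : pvClip mp r R ≠ [] := by
      intro hcon
      have := congrArg List.length hcon
      simp [hclip] at this
      omega
    cases hmx : PySem.List.max? (pvClip mp r R) (fun x => x) with
    | none => exact absurd ((PySem.List.max?_eq_none_iff _ _).mp hmx) hne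
    | some m =>
      have hall := pvMaxLe1 (pvClip mp r R) hne
      rw [hmx] at hall
      rw [pvAllMin, ← hall, Bool.or_comm, Bool.and_assoc]

-- the first-condition-and-max disjunct of A equals B's w
theorem pvWEq (mp : List Int) (r R : Nat) (c : Int) (hr : r < R) (hn : R ≤ mp.length)
    (hc0 : 0 ≤ c) (hclim : c < PySem.List.pyGetD mp (r:Int) 0)
    (h1 : mp.length = 1 → mp.headD 0 ≤ 1) :
    ((PySem.List.pyGetD (pvX mp r R c) 0 0
        == 1 + (PySem.List.slice (pvX mp r R c) (some 1) none).sum)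
      && (match PySem.List.max? (PySem.List.slice (pvX mp r R c) (some 1) none) (fun x => x) with
          | some m => decide (m ≤ 1)
          | none => false))
    = ((pvXg mp (r:Int) c 0
          == 1 + pvSumFrom mp (r:Int) c (pvSval mp r R c) ((mp.drop R).sum)
                  (((mp.drop 1).take (r - 1)).sum) 1)
        && ((((mp.drop 1).take (r - 1)).all (fun v => decide (v ≤ 1)))
          && ((match (if (max 1 r) < R
                  then PySem.List.max? ((pvClip mp r R).drop (max 1 r - r)) (fun x => x)
                  else none) with
              | none => true
              | some m => decide (m ≤ 1) || decide (c ≤ 1))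
            && ((mp.drop R).all (fun v => decide (v ≤ 1)))))) := by
  have g0 : PySem.List.pyGetD (pvX mp r R c) 0 0 = pvXg mp (r:Int) c 0 := by
    simpa using pvX_getD mp r R c 0 (by omega) hn (by omega)
  have hs1 : (PySem.List.slice (pvX mp r R c) (some 1) none).sum
      = pvSumFrom mp (r:Int) c (pvSval mp r R c) ((mp.drop R).sum)
          (((mp.drop 1).take (r - 1)).sum) 1 := by
    rw [PySem.List.slice_from _ (by norm_num : (0:Int) ≤ 1)]
    simpa using pvX_sumFrom mp r R c 1 hr hn (by omega)
  rw [g0, hs1]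
  by_cases hn1 : mp.length = 1
  · have hr0 : r = 0 := by omega
    subst hr0
    have hR1 : R = 1 := by omega
    subst hR1
    obtain ⟨a, ha⟩ : ∃ a, mp = [a] := by
      match mp, hn1 with
      | [a], _ => exact ⟨a, rfl⟩
    subst ha
    have ha1 : a ≤ 1 := by simpa using h1 rfl
    have hca : c < a := by
      rw [show ((0:Nat):Int) = (0:Int) from rfl, PySem.List.pyGetD_zero_cons] at hclim
      exact hclim
    have hfalse : ¬ (min a c = 1) := by omega
    have hrange : PySem.List.pyRange 0 1 1 = [0] := by decide
    have hxg : pvXg [a] ((0:Nat):Int) c 0 = min a c := by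
      rw [pvXg, if_pos (by norm_num)]
      norm_num [PySem.List.pyGetD_zero_cons]
    have hsum : pvSumFrom [a] ((0:Nat):Int) c (pvSval [a] 0 1 c) ((List.drop 1 [a]).sum)
        (((List.drop 1 [a]).take (0 - 1)).sum) 1 = 0 := by
      rw [pvSumFrom, if_neg (by norm_num)]
      norm_num [hrange, pvSval, pvClip, PySem.List.pyGetD_zero_cons]
    rw [hxg, hsum]
    have hc1 : (min a c == 1 + 0) = false := by
      simp only [beq_eq_false_iff_ne, ne_eq]
      omega
    simp [hc1]
    intro h
    exact absurd h hfalse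
  · have hx1ne : (pvX mp r R c).drop 1 ≠ [] := by
      intro hcon
      have := congrArg List.length hcon
      rw [List.length_drop, pvX_length mp r R c (by omega) hn] at this
      simp at this
      omega
    rw [PySem.List.slice_from _ (by norm_num : (0:Int) ≤ 1), show (1:Int).toNat = 1 from rfl]
    rw [pvMaxLe1 _ hx1ne, pvMaxEq mp r R c hr hn]
    simp only [Bool.and_assoc]

-- A's p1 on the rebuilt board = B's q1
theorem pvP1Eq (mp : List Int) (r R : Nat) (c cn : Int) (hr : r < R) (hn : R ≤ mp.length) :
    pvP1 (pvX mp r R c) (R:Int) cn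
      = (decide (3 ≤ (R:Int)) && (pvXg mp (r:Int) c 0 == 2) && (pvXg mp (r:Int) c 1 == 2)
          && (pvXg mp (r:Int) c 2 == 1)
          && (pvSumFrom mp (r:Int) c (pvSval mp r R c) ((mp.drop R).sum)
                (((mp.drop 3).take (r - 3)).sum) 3 == 0)) := by
  unfold pvP1
  by_cases h3 : (3:Int) ≤ (R:Int)
  · have h3' : 3 ≤ R := by exact_mod_cast h3
    have g0 : PySem.List.pyGetD (pvX mp r R c) 0 0 = pvXg mp (r:Int) c 0 := by
      simpa using pvX_getD mp r R c 0 (by omega) hn (by omega)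
    have g1 : PySem.List.pyGetD (pvX mp r R c) 1 0 = pvXg mp (r:Int) c 1 := by
      simpa using pvX_getD mp r R c 1 (by omega) hn (by omega)
    have g2 : PySem.List.pyGetD (pvX mp r R c) 2 0 = pvXg mp (r:Int) c 2 := by
      simpa using pvX_getD mp r R c 2 (by omega) hn (by omega)
    have s3 : (PySem.List.slice (pvX mp r R c) (some 3) none).sum
        = pvSumFrom mp (r:Int) c (pvSval mp r R c) ((mp.drop R).sum)
            (((mp.drop 3).take (r - 3)).sum) 3 := by
      rw [PySem.List.slice_from _ (by norm_num : (0:Int) ≤ 3)]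
      simpa using pvX_sumFrom mp r R c 3 hr hn (by omega)
    rw [g0, g1, g2, s3]
  · simp [h3]

-- A's p2 on the rebuilt board = B's q2
theorem pvP2Eq (mp : List Int) (r R : Nat) (c cn : Int) (hr : r < R) (hn : R ≤ mp.length) :
    pvP2 (pvX mp r R c) (R:Int) cn
      = (decide (2 ≤ (R:Int)) && (pvXg mp (r:Int) c 0 == 3) && (pvXg mp (r:Int) c 1 == 2)
          && (pvSumFrom mp (r:Int) c (pvSval mp r R c) ((mp.drop R).sum)
                (((mp.drop 2).take (r - 2)).sum) 2 == 0)) := by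
  unfold pvP2
  by_cases h2 : (2:Int) ≤ (R:Int)
  · have h2' : 2 ≤ R := by exact_mod_cast h2
    have g0 : PySem.List.pyGetD (pvX mp r R c) 0 0 = pvXg mp (r:Int) c 0 := by
      simpa using pvX_getD mp r R c 0 (by omega) hn (by omega)
    have g1 : PySem.List.pyGetD (pvX mp r R c) 1 0 = pvXg mp (r:Int) c 1 := by
      simpa using pvX_getD mp r R c 1 (by omega) hn (by omega)
    have s2 : (PySem.List.slice (pvX mp r R c) (some 2) none).sum
        = pvSumFrom mp (r:Int) c (pvSval mp r R c) ((mp.drop R).sum)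
            (((mp.drop 2).take (r - 2)).sum) 2 := by
      rw [PySem.List.slice_from _ (by norm_num : (0:Int) ≤ 2)]
      simpa using pvX_sumFrom mp r R c 2 hr hn (by omega)
    rw [g0, g1, s2]
  · simp [h2]

-- A's p3 on the rebuilt board = B's q3
theorem pvP3Eq (mp : List Int) (r R : Nat) (c cn : Int) (hr : r < R) (hn : R ≤ mp.length) :
    pvP3 (pvX mp r R c) (R:Int) cn
      = (decide (3 ≤ (R:Int)) && (pvXg mp (r:Int) c 0 == 4) && (pvXg mp (r:Int) c 1 == 2)
          && (pvXg mp (r:Int) c 2 == 2)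
          && (pvSumFrom mp (r:Int) c (pvSval mp r R c) ((mp.drop R).sum)
                (((mp.drop 3).take (r - 3)).sum) 3 == 0)) := by
  unfold pvP3
  by_cases h3 : (3:Int) ≤ (R:Int)
  · have h3' : 3 ≤ R := by exact_mod_cast h3
    have hxl : 3 ≤ (pvX mp r R c).length := by
      rw [pvX_length mp r R c (by omega) hn]; omega
    rw [pvTakeEq3 _ hxl]
    have g0 : PySem.List.pyGetD (pvX mp r R c) 0 0 = pvXg mp (r:Int) c 0 := by
      simpa using pvX_getD mp r R c 0 (by omega) hn (by omega)
    have g1 : PySem.List.pyGetD (pvX mp r R c) 1 0 = pvXg mp (r:Int) c 1 := by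
      simpa using pvX_getD mp r R c 1 (by omega) hn (by omega)
    have g2 : PySem.List.pyGetD (pvX mp r R c) 2 0 = pvXg mp (r:Int) c 2 := by
      simpa using pvX_getD mp r R c 2 (by omega) hn (by omega)
    have s3 : (PySem.List.slice (pvX mp r R c) (some 3) none).sum
        = pvSumFrom mp (r:Int) c (pvSval mp r R c) ((mp.drop R).sum)
            (((mp.drop 3).take (r - 3)).sum) 3 := by
      rw [PySem.List.slice_from _ (by norm_num : (0:Int) ≤ 3)]
      simpa using pvX_sumFrom mp r R c 3 hr hn (by omega)
    rw [g0, g1, g2, s3]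
    simp only [Bool.and_assoc]
  · simp [h3]

-- A's p4 on the rebuilt board = B's q4
theorem pvP4Eq (mp : List Int) (r R : Nat) (c cn : Int) (hr : r < R) (hn : R ≤ mp.length) :
    pvP4 (pvX mp r R c) (R:Int) cn
      = (decide (4 ≤ (R:Int)) && (pvXg mp (r:Int) c 0 == 3) && (pvXg mp (r:Int) c 1 == 3)
          && (pvXg mp (r:Int) c 2 == 1) && (pvXg mp (r:Int) c 3 == 1)
          && (pvSumFrom mp (r:Int) c (pvSval mp r R c) ((mp.drop R).sum)
                (((mp.drop 4).take (r - 4)).sum) 4 == 0)) := by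
  unfold pvP4
  by_cases h4 : (4:Int) ≤ (R:Int)
  · have h4' : 4 ≤ R := by exact_mod_cast h4
    have hxl : 4 ≤ (pvX mp r R c).length := by
      rw [pvX_length mp r R c (by omega) hn]; omega
    rw [pvTakeEq4 _ hxl]
    have g0 : PySem.List.pyGetD (pvX mp r R c) 0 0 = pvXg mp (r:Int) c 0 := by
      simpa using pvX_getD mp r R c 0 (by omega) hn (by omega)
    have g1 : PySem.List.pyGetD (pvX mp r R c) 1 0 = pvXg mp (r:Int) c 1 := by
      simpa using pvX_getD mp r R c 1 (by omega) hn (by omega)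
    have g2 : PySem.List.pyGetD (pvX mp r R c) 2 0 = pvXg mp (r:Int) c 2 := by
      simpa using pvX_getD mp r R c 2 (by omega) hn (by omega)
    have g3 : PySem.List.pyGetD (pvX mp r R c) 3 0 = pvXg mp (r:Int) c 3 := by
      simpa using pvX_getD mp r R c 3 (by omega) hn (by omega)
    have s4 : (PySem.List.slice (pvX mp r R c) (some 4) none).sum
        = pvSumFrom mp (r:Int) c (pvSval mp r R c) ((mp.drop R).sum)
            (((mp.drop 4).take (r - 4)).sum) 4 := by
      rw [PySem.List.slice_from _ (by norm_num : (0:Int) ≤ 4)]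
      simpa using pvX_sumFrom mp r R c 4 hr hn (by omega)
    rw [g0, g1, g2, g3, s4]
    simp only [Bool.and_assoc]
  · simp [h4]

-- the heart: A's losing-test on the rebuilt board equals B's O(1) formula
theorem pvCheckEq (mp : List Int) (rn cn c : Int) (r R : Nat)
    (hR : rn = (R:Int)) (hr : r < R) (hn : R ≤ mp.length)
    (hc0 : 0 ≤ c) (hclim : c < PySem.List.pyGetD mp (r:Int) 0)
    (h1 : mp.length = 1 → mp.headD 0 ≤ 1) :
    pvIsLosing (pvX mp r R c) rn cn
      = pvCheck mp rn (r:Int) ((mp.drop R).sum) ((mp.drop R).all (fun v => decide (v ≤ 1)))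
          (if (max 1 (r:Int)) < rn
            then PySem.List.max? (PySem.List.slice (pvClip mp r R) (some ((max 1 (r:Int)) - r)) none) (fun x => x)
            else none)
          (((mp.drop 1).take (r - 1)).all (fun v => decide (v ≤ 1)))
          (((mp.drop 1).take (r - 1)).sum) (((mp.drop 2).take (r - 2)).sum)
          (((mp.drop 3).take (r - 3)).sum) (((mp.drop 4).take (r - 4)).sum)
          c (pvSval mp r R c) := by
  subst hR
  have hM1 : (if (max 1 (r:Int)) < (R:Int)
        then PySem.List.max? (PySem.List.slice (pvClip mp r R) (some ((max 1 (r:Int)) - r)) none) (fun x => x)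
        else none)
      = (if (max 1 r) < R then PySem.List.max? ((pvClip mp r R).drop (max 1 r - r)) (fun x => x)
        else none) := by
    have hcast : (max 1 (r:Int)) = ((max 1 r : Nat) : Int) := by push_cast; rfl
    rw [hcast]
    by_cases hlt : max 1 r < R
    · rw [if_pos (by exact_mod_cast hlt), if_pos hlt]
      have hle : r ≤ max 1 r := le_max_right 1 r
      rw [show ((max 1 r : Nat) : Int) - (r:Int) = ((max 1 r - r : Nat) : Int) by
        push_cast [Nat.cast_sub hle]; ring]
      rw [PySem.List.slice_from _ (Int.natCast_nonneg _), Int.toNat_natCast]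
    · rw [if_neg (by exact_mod_cast hlt), if_neg hlt]
  simp only [pvIsLosing, pvCheck, hM1]
  rw [pvWEq mp r R c hr hn hc0 hclim h1, pvP1Eq mp r R c cn hr hn, pvP2Eq mp r R c cn hr hn,
    pvP3Eq mp r R c cn hr hn, pvP4Eq mp r R c cn hr hn]
  simp only [Bool.or_assoc, Bool.and_assoc]

-- inner loops agree
theorem pvInnerEq (mp : List Int) (rn cn : Int) (r R : Nat)
    (hR : rn = (R:Int)) (hr : r < R) (hn : R ≤ mp.length)
    (h1 : mp.length = 1 → mp.headD 0 ≤ 1) :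
    ∀ (fuel : Nat) (c : Int), 0 ≤ c → fuel = (PySem.List.pyGetD mp (r:Int) 0 - c).toNat →
    pvFindC mp rn cn ((r:Int)+1) (PySem.List.pyRange (c+1) (PySem.List.pyGetD mp (r:Int) 0 + 1) 1)
      = Option.map (· + 1)
          (pvInner mp rn (r:Int) ((mp.drop R).sum) ((mp.drop R).all (fun v => decide (v ≤ 1)))
            (if (max 1 (r:Int)) < rn
              then PySem.List.max? (PySem.List.slice (pvClip mp r R) (some ((max 1 (r:Int)) - r)) none) (fun x => x)
              else none)
            (((mp.drop 1).take (r - 1)).all (fun v => decide (v ≤ 1)))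
            (((mp.drop 1).take (r - 1)).sum) (((mp.drop 2).take (r - 2)).sum)
            (((mp.drop 3).take (r - 3)).sum) (((mp.drop 4).take (r - 4)).sum)
            (PySem.Dict.counter (pvClip mp r R))
            c (pvSval mp r R c) (pvGval mp r R c) fuel) := by
  subst hR
  intro fuel
  induction fuel with
  | zero =>
    intro c hc0 hfuel
    rw [PySem.List.pyRange_one_eq_nil (by omega)]
    simp [pvFindC, pvInner]
  | succ fuel ih =>
    intro c hc0 hfuel
    have hclim : c < PySem.List.pyGetD mp (r:Int) 0 := by omega
    rw [PySem.List.pyRange_one_cons (by omega)]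
    rw [pvFindC]
    rw [pvApply_eq mp r R c cn (le_of_lt hr) hn]
    rw [pvCheckEq mp ((R:Nat):Int) cn c r R rfl hr hn hc0 hclim h1]
    rw [pvInner]
    have hS : pvSval mp r R c + pvGval mp r R c = pvSval mp r R (c+1) := by
      rw [pvSval, pvSval, pvGval, pvSval_succ]
    have hG : pvGval mp r R c - (PySem.Dict.counter (pvClip mp r R)).getD (c+1) 0
        = pvGval mp r R (c+1) := by
      rw [PySem.Dict.getD_counter, pvGval, pvGval, pvGval_succ]
    by_cases hchk : pvCheck mp ((R:Nat):Int) (r:Int) ((mp.drop R).sum)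
        ((mp.drop R).all (fun v => decide (v ≤ 1)))
        (if (max 1 (r:Int)) < ((R:Nat):Int)
          then PySem.List.max? (PySem.List.slice (pvClip mp r R) (some ((max 1 (r:Int)) - r)) none) (fun x => x)
          else none)
        (((mp.drop 1).take (r - 1)).all (fun v => decide (v ≤ 1)))
        (((mp.drop 1).take (r - 1)).sum) (((mp.drop 2).take (r - 2)).sum)
        (((mp.drop 3).take (r - 3)).sum) (((mp.drop 4).take (r - 4)).sum)
        c (pvSval mp r R c) = true
    · rw [if_pos hchk, if_pos hchk]
      rfl
    · rw [if_neg (by simpa using hchk), if_neg (by simpa using hchk)]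
      rw [hS, hG]
      exact ih (c+1) (by omega) (by omega)


-- one row of A = one row of B
theorem pvRowEq (mp : List Int) (rn cn : Int) (r R : Nat)
    (hR : rn = (R:Int)) (hr : r < R) (hn : R ≤ mp.length)
    (h1 : mp.length = 1 → mp.headD 0 ≤ 1) :
    pvFindC mp rn cn ((r:Int)+1)
        (PySem.List.pyRange 1 (PySem.List.pyGetD mp (r:Int) 0 + 1) 1)
      = Option.map (· + 1)
          (pvRow mp rn rn ((PySem.List.slice mp (some rn) none).sum)
            ((PySem.List.slice mp (some rn) none).all (fun v => decide (v ≤ 1))) (r:Int)) := by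
  have hclip : PySem.List.slice mp (some (r:Int)) (some rn) = pvClip mp r R := by
    rw [hR, PySem.List.slice_natCast]
    rfl
  have hTS : PySem.List.slice mp (some rn) none = mp.drop R := by
    rw [hR, PySem.List.slice_from_natCast]
  have hsl : ∀ (k : Nat), PySem.List.slice mp (some ((k:Nat):Int)) (some ((r:Nat):Int))
      = (mp.drop k).take (r - k) := by
    intro k
    rw [PySem.List.slice_natCast]
  simp only [pvRow, hclip, hTS]
  have h0 : PySem.List.pyGetD mp (r:Int) 0 - 0 = PySem.List.pyGetD mp (r:Int) 0 := by ring
  have := pvInnerEq mp rn cn r R hR hr hn h1 ((PySem.List.pyGetD mp (r:Int) 0).toNat) 0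
    le_rfl (by rw [h0])
  rw [show ((0:Int) + 1) = 1 by ring] at this
  rw [this]
  subst hR
  congr 1
  have e1 : PySem.List.slice mp (some (1:Int)) (some ((r:Nat):Int)) = (mp.drop 1).take (r - 1) := by
    simpa using hsl 1
  have e2 : PySem.List.slice mp (some (2:Int)) (some ((r:Nat):Int)) = (mp.drop 2).take (r - 2) := by
    simpa using hsl 2
  have e3 : PySem.List.slice mp (some (3:Int)) (some ((r:Nat):Int)) = (mp.drop 3).take (r - 3) := by
    simpa using hsl 3
  have e4 : PySem.List.slice mp (some (4:Int)) (some ((r:Nat):Int)) = (mp.drop 4).take (r - 4) := by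
    simpa using hsl 4
  rw [e1, e2, e3, e4, pvSval, pvSval_zero, pvGval]


-- the row loops agree
theorem pvOuterEq (mp : List Int) (rn cn : Int) (R : Nat)
    (hR : rn = (R:Int)) (hn : R ≤ mp.length)
    (h1 : mp.length = 1 → mp.headD 0 ≤ 1) :
    ∀ (m k : Nat), k + m = R →
    pvFindR mp rn cn (PySem.List.pyRange ((k:Int)+1) (rn+1) 1)
      = pvOuter mp rn rn ((PySem.List.slice mp (some rn) none).sum)
          ((PySem.List.slice mp (some rn) none).all (fun v => decide (v ≤ 1)))
          (PySem.List.pyRange (k:Int) rn 1) := by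
  intro m
  induction m with
  | zero =>
    intro k hk
    have hkR : k = R := by omega
    subst hkR
    rw [PySem.List.pyRange_one_eq_nil (show rn + 1 ≤ (k:Int) + 1 by omega),
        PySem.List.pyRange_one_eq_nil (show rn ≤ (k:Int) by omega)]
    simp [pvFindR, pvOuter]
  | succ m ih =>
    intro k hk
    have hkR : k < R := by omega
    rw [PySem.List.pyRange_one_cons (show (k:Int) + 1 < rn + 1 by omega),
        PySem.List.pyRange_one_cons (show (k:Int) < rn by omega)]
    simp only [pvFindR, pvOuter]
    rw [show ((k:Int) + 1 - 1) = (k:Int) by ring]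
    rw [pvRowEq mp rn cn k R hR hkR hn h1]
    cases hrow : pvRow mp rn rn ((PySem.List.slice mp (some rn) none).sum)
        ((PySem.List.slice mp (some rn) none).all (fun v => decide (v ≤ 1))) (k:Int) with
    | none =>
      simp only [Option.map_none]
      rw [show ((k:Int) + 1) = (((k+1 : Nat)):Int) by push_cast; ring]
      exact ih (k+1) (by omega)
    | some c =>
      simp only [Option.map_some]

-- ===== VERDICT (by name: the statement is the Claim_ definition above) =====
theorem make_losing_spec : Claim_equal_make_losing := by
  intro mp rn cn hdom hpre
  unfold Spec_make_losing make_losing make_losing_alt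
  by_cases h0 : 1 ≤ rn
  · obtain ⟨hn, hh⟩ := hpre h0
    have h1 : mp.length = 1 → mp.headD 0 ≤ 1 := by
      intro hlen
      by_contra hcon
      exact hh ⟨hlen, by omega⟩
    have hmin : min rn (mp.length : Int) = rn := min_eq_left (by exact_mod_cast hn)
    have hmax : max 0 rn = rn := max_eq_right (by omega)
    simp only [hmin, hmax]
    have hR : rn = ((rn.toNat : Nat) : Int) := by omega
    have := pvOuterEq mp rn cn rn.toNat hR (by omega) h1 rn.toNat 0 (by omega)
    rw [show (((0:Nat):Int) + 1) = 1 by norm_num] at this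
    rw [show (((0:Nat)):Int) = (0:Int) by norm_num] at this
    exact this
  · rw [PySem.List.pyRange_one_eq_nil (show rn + 1 ≤ 1 by omega)]
    have hnil2 : PySem.List.pyRange 0 (min rn ((mp.length : Nat) : Int)) 1 = [] :=
      PySem.List.pyRange_one_eq_nil (by omega)
    simp [pvFindR, pvOuter, hnil2]
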